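-- pv_equiv track=rewrite | github.com/HotShot003/Data-Structure-Practice-Questions | Step1-Learn The Basics/Number Logics/NumberLogics53.py | nth_PerfectSquare
-- ===== SOURCE A (Python) =====
-- def is_PerfectSquare(n):
--
--     i=1
--
--     while i*i <= n:
--         if i*i == n :
--             return True
--         i+=1
--     return False
--
-- def nth_PerfectSquare(n):
--
--     count = 0
--
--     curr_num=1
--
--     while count < n :
--
--
--         if is_PerfectSquare(curr_num):
--             count +=1
--
--         if count == n :
--             return curr_num
--
--         curr_num +=1
--     return curr_num - 1
-- ===== SOURCE B (Python) =====
-- def nth_PerfectSquare(n):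
--     # nth perfect square in closed form; 0 squares requested (n <= 0) -> 0, matching A
--     return n * n if n > 0 else 0
-- ===== Notes on version B (the rewrite author's own statement) =====
-- stated objective: faster
-- what changed: Replaces A's scan of every integer (each tested for squareness by trial multiplication) with the closed form n*n (0 for n <= 0).
import Mathlib
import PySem

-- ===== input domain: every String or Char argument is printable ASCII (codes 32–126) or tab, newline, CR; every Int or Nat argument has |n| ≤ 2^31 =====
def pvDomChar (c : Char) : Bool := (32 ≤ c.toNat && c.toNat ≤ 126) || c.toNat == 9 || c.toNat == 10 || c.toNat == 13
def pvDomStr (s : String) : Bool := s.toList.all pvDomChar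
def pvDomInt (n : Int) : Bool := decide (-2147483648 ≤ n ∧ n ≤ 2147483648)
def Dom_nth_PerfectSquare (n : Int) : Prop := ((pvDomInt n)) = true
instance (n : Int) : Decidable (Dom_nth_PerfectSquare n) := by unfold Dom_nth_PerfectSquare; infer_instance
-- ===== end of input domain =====

-- B replaces A's scan over all integers with the closed form n*n (0 for n ≤ 0): asymptotically faster.

-- ===== PORT A =====
-- while i*i <= n: if i*i == n: return True; i += 1 / return False
-- fuel n.toNat + 2 is proven sufficient below (the loop stops once i*i > n); at fuel 0 the value is never reached.
def isPS_aux (fuel : Nat) (i n : Int) : Bool :=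
  match fuel with
  | 0 => false
  | f + 1 =>
    if i * i ≤ n then
      if i * i == n then true else isPS_aux f (i + 1) n
    else false

def is_PerfectSquare (n : Int) : Bool := isPS_aux (n.toNat + 2) 1 n

-- while count < n: if is_PerfectSquare(curr): count += 1; if count == n: return curr; curr += 1 / return curr - 1
def nthPS_loop (n : Int) (fuel : Nat) (count curr : Int) : Int :=
  match fuel with
  | 0 => curr - 1
  | f + 1 =>
    if count < n then
      let count' := if is_PerfectSquare curr then count + 1 else count
      if count' == n then curr
      else nthPS_loop n f count' (curr + 1)
    else curr - 1

-- fuel n.toNat * n.toNat + 1 is proven sufficient (the loop returns at curr = n*n for n ≥ 1, immediately otherwise)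
def nth_PerfectSquare (n : Int) : Int := nthPS_loop n (n.toNat * n.toNat + 1) 0 1

-- ===== PORT B =====
def nth_PerfectSquare_alt (n : Int) : Int := if 0 < n then n * n else 0

-- ===== PRECONDITION & SPEC =====
def Spec_nth_PerfectSquare (n : Int) (out : Int) : Prop := out = nth_PerfectSquare_alt n
instance (n : Int) (out : Int) : Decidable (Spec_nth_PerfectSquare n out) := by unfold Spec_nth_PerfectSquare; infer_instance

-- ===== CLAIM (what is proved, stated in full; the proofs are below) =====
def Claim_equal_nth_PerfectSquare : Prop := ∀ (n : Int), Dom_nth_PerfectSquare n → Spec_nth_PerfectSquare n (nth_PerfectSquare n)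

-- ===== LEMMAS AND PROOFS =====

-- the inner scan reaches t and answers true on input t*t, given enough fuel
theorem isPS_aux_true (fuel : Nat) : ∀ (i t : Int), 1 ≤ i → i ≤ t → (fuel : Int) ≥ t - i + 1 →
    isPS_aux fuel i (t * t) = true := by
  induction fuel with
  | zero => intro i t h1 h2 hf; simp at hf; omega
  | succ f ih =>
    intro i t h1 h2 hf
    by_cases heq : i = t
    · subst heq; simp [isPS_aux]
    · have hlt : i < t := lt_of_le_of_ne h2 heq
      have hle : i * i ≤ t * t := by nlinarith
      have hne : i * i ≠ t * t := by nlinarith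
      simp only [isPS_aux, if_pos hle, beq_iff_eq, if_neg hne]
      apply ih (i + 1) t (by omega) (by omega)
      push_cast at hf ⊢; omega

-- the inner scan answers false when no j ≥ i squares to m, given enough fuel
theorem isPS_aux_false (fuel : Nat) : ∀ (i m : Int), 1 ≤ i → (∀ j : Int, i ≤ j → j * j ≠ m) →
    1 ≤ fuel → (fuel : Int) ≥ m - i * i + 1 → isPS_aux fuel i m = false := by
  induction fuel with
  | zero => intro _ _ _ _ h _; omega
  | succ f ih =>
    intro i m h1 hns _ hf
    by_cases hle : i * i ≤ m
    · have hne : i * i ≠ m := hns i le_rfl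
      have hlt : i * i < m := lt_of_le_of_ne hle hne
      simp only [isPS_aux, if_pos hle, beq_iff_eq, if_neg hne]
      push_cast at hf
      apply ih (i + 1) m (by omega) (fun j hj => hns j (by omega)) (by omega)
      nlinarith
    · simp [isPS_aux, hle]

theorem isPS_true (t : Int) (ht : 1 ≤ t) : is_PerfectSquare (t * t) = true := by
  apply isPS_aux_true _ 1 t le_rfl ht
  have h1 : t ≤ t * t := by nlinarith
  have h0 : ((t * t).toNat : Int) = t * t := Int.toNat_of_nonneg (by nlinarith)
  push_cast; omega

theorem isPS_false (m : Int) (hns : ∀ j : Int, 1 ≤ j → j * j ≠ m) : is_PerfectSquare m = false := by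
  apply isPS_aux_false _ 1 m le_rfl hns (by omega)
  have := Int.self_le_toNat m
  push_cast; omega

-- loop invariant: count squares found, curr in (count², (count+1)²]; the loop returns n*n
theorem loop_eq (fuel : Nat) : ∀ (n c m : Int), 0 ≤ c → c < n → c * c < m → m ≤ (c + 1) * (c + 1) →
    (fuel : Int) ≥ n * n - m + 1 → nthPS_loop n fuel c m = n * n := by
  induction fuel with
  | zero =>
    intro n c m h0 h1 h2 h3 hf
    have : (c + 1) * (c + 1) ≤ n * n := by nlinarith
    simp at hf; omega
  | succ f ih =>
    intro n c m h0 h1 h2 h3 hf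
    by_cases heq : m = (c + 1) * (c + 1)
    · have hps : is_PerfectSquare m = true := by rw [heq]; exact isPS_true (c + 1) (by omega)
      by_cases hcn : c + 1 = n
      · simp only [nthPS_loop, if_pos h1, hps, if_true, beq_iff_eq, if_pos hcn]
        rw [heq, hcn]
      · simp only [nthPS_loop, if_pos h1, hps, if_true, beq_iff_eq, if_neg hcn]
        apply ih n (c + 1) (m + 1) (by omega) (by omega) (by omega) (by nlinarith)
        push_cast at hf ⊢; omega
    · have hps : is_PerfectSquare m = false := by
        apply isPS_false
        intro j hj
        by_cases hjc : j ≤ c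
        · nlinarith
        · have : c + 1 ≤ j := by omega
          have : (c + 1) * (c + 1) ≤ j * j := by nlinarith
          omega
      have hcn : c ≠ n := by omega
      simp only [nthPS_loop, if_pos h1, hps, Bool.false_eq_true, if_false, beq_iff_eq, if_neg hcn]
      apply ih n c (m + 1) h0 h1 (by omega) (by omega)
      push_cast at hf ⊢; omega

-- ===== VERDICT (by name: the statement is the Claim_ definition above) =====
theorem nth_PerfectSquare_spec : Claim_equal_nth_PerfectSquare := by
  intro n _
  unfold Spec_nth_PerfectSquare nth_PerfectSquare nth_PerfectSquare_alt
  by_cases hn : 0 < n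
  · rw [if_pos hn]
    apply loop_eq _ n 0 1 le_rfl hn (by omega) (by omega)
    have h0 : (n.toNat : Int) = n := Int.toNat_of_nonneg (by omega)
    push_cast; nlinarith
  · rw [if_neg hn]
    have ht : n.toNat = 0 := by omega
    simp [nthPS_loop, hn]
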